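-- pv_equiv track=rewrite | github.com/Jinwoongma/Algorithm | test/line_2020/problem5.py | solution
-- ===== SOURCE A (Python) =====
-- def solution(dataSource, tags):
--     answer = []
--     data = []
--     for s in dataSource:
--         data.append([s[0], set(s[1:])])
--
--     score = [[0, data[i][0]] for i in range(len(data))]
--     for i in range(len(data)):
--         for t in tags:
--             if t in data[i][1]:
--                 score[i][0] += 1
--
--     score = sorted(score, key=lambda x: (-x[0], x[1]))
--     i = 0
--     while True:
--         if i >= len(score) or len(answer) == 10:
--             break
--         if score[i][0] > 0:
--             answer.append(score[i][1])
--         i += 1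
--     return answer
-- ===== SOURCE B (Python) =====
-- def solution(dataSource, tags):
--     # Bounded top-10 selection: keep a sorted list of at most 10 best keys,
--     # inserting each positive-score row; no full sort of all rows.
--     top = []  # ascending (-score, id) keys, length <= 10
--     for s in dataSource:
--         name, rest = s[0], set(s[1:])
--         sc = 0
--         for t in tags:
--             if t in rest:
--                 sc += 1
--         if sc > 0:
--             key = (-sc, name)
--             j = 0
--             while j < len(top) and top[j] <= key:
--                 j += 1
--             top.insert(j, key)
--             del top[10:]
--     return [k[1] for k in top]
-- ===== Notes on version B (the rewrite author's own statement) =====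
-- stated objective: alternative
-- what changed: Replaces A's build-all-scores + full stable sort + manual while-loop with a single pass that keeps a bounded sorted list of the 10 best (-score, id) keys via insertion into a length-<=10 list, skipping zero-score rows entirely.
import Mathlib
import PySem

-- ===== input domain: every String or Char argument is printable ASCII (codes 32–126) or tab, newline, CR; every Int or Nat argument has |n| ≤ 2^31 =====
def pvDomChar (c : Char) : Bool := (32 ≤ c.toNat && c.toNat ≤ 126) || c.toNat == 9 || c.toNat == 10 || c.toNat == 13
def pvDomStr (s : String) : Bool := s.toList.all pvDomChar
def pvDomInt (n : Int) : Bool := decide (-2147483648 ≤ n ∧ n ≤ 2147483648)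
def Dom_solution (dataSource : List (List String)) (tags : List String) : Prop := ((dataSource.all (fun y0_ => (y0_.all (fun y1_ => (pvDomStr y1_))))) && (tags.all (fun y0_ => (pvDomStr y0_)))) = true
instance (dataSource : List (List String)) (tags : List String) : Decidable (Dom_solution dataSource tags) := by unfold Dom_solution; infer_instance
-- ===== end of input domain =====

-- B replaces A's full stable sort of all scored rows + manual while-loop with a single pass
-- keeping a bounded (≤ 10) sorted list of the best (-score, id) keys (a top-k selection).

-- ===== PORT A =====
-- the trailing while loop of A: walk the sorted score list, appending ids of positive
-- scores until 10 are collected or the list ends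
def solutionLoop : List (Int × String) → List String → List String
  | [], answer => answer
  | p :: rest, answer =>
      if answer.length = 10 then answer
      else solutionLoop rest (if p.1 > 0 then answer ++ [p.2] else answer)

def solution (dataSource : List (List String)) (tags : List String) : List String :=
  -- data.append([s[0], set(s[1:])]); s[0] raises IndexError on an empty row (excluded by Pre_)
  let data := dataSource.foldl (fun acc s =>
      acc ++ [((PySem.List.pyGet? s 0).getD "", PySem.Set.ofList (PySem.List.slice s (some 1)))]) []
  -- score[i] starts as [0, id] and the nested loops add 1 per matching tag; each outer
  -- iteration of the mutation loop touches only entry i, so it is this per-entry fold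
  let score := data.map (fun d =>
      (tags.foldl (fun acc t => if PySem.Set.contains d.2 t then acc + 1 else acc) (0 : Int), d.1))
  solutionLoop (PySem.List.sorted2 score (fun p => -p.1) (fun p => p.2)) []

-- ===== PORT B =====
-- Python tuple `<=` on an (int, str) pair (code-point lexicographic on the strings, as in Lean)
def pyKeyLe (p q : Int × String) : Bool := decide (p.1 < q.1) || (decide (p.1 = q.1) && decide (p.2 ≤ q.2))

-- the `while j < len(top) and top[j] <= key` scan followed by `top.insert(j, key)`
def insertKey (x : Int × String) : List (Int × String) → List (Int × String)
  | [] => [x]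
  | y :: ys => if pyKeyLe y x then y :: insertKey x ys else x :: y :: ys

-- rest = set(s[1:]) of a row;  sc = number of tags (with multiplicity) found in rest
def rowScore (tags : List String) (s : List String) : Int :=
  let rest := PySem.Set.ofList (PySem.List.slice s (some 1))
  tags.foldl (fun acc t => if PySem.Set.contains rest t then acc + 1 else acc) 0

def solution_alt (dataSource : List (List String)) (tags : List String) : List String :=
  (dataSource.foldl (fun top s =>
      let name := (PySem.List.pyGet? s 0).getD ""   -- s[0]: raises IndexError on an empty row (excluded by Pre_)
      let sc := rowScore tags s
      if sc > 0 then
        (insertKey (-sc, name) top).take 10   -- insert, then del top[10:]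
      else top) []).map (fun k => k.2)

-- ===== PRECONDITION & SPEC =====
-- Pre_ excludes inputs containing an empty row: there A raises IndexError on s[0].
def Pre_solution (dataSource : List (List String)) (tags : List String) : Prop :=
  ∀ s ∈ dataSource, s ≠ []
instance (dataSource : List (List String)) (tags : List String) : Decidable (Pre_solution dataSource tags) := by unfold Pre_solution; infer_instance
def pvWitness_solution : List (List String) × List String := ([["a", "x"], ["b", "y"]], ["x"])

def Spec_solution (dataSource : List (List String)) (tags : List String) (out : List String) : Prop := out = solution_alt dataSource tags
instance (dataSource : List (List String)) (tags : List String) (out : List String) : Decidable (Spec_solution dataSource tags out) := by unfold Spec_solution; infer_instance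

-- ===== CLAIM (what is proved, stated in full; the proofs are below) =====
def Claim_equal_solution : Prop := ∀ (dataSource : List (List String)) (tags : List String), Dom_solution dataSource tags → Pre_solution dataSource tags → Spec_solution dataSource tags (solution dataSource tags)

-- ===== LEMMAS AND PROOFS =====

-- A's while loop takes the first (10 - len answer) positive-score ids, in order
lemma solutionLoop_eq (l : List (Int × String)) : ∀ ans : List String, ans.length ≤ 10 →
    solutionLoop l ans
      = ans ++ ((l.filter (fun p => decide (p.1 > 0))).map (fun p => p.2)).take (10 - ans.length) := by
  induction l with
  | nil => intro ans _; simp [solutionLoop]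
  | cons p rest ih =>
    intro ans h
    by_cases h10 : ans.length = 10
    · simp [solutionLoop, h10]
    · have hlt : ans.length < 10 := lt_of_le_of_ne h h10
      by_cases hp : p.1 > 0
      · have := ih (ans ++ [p.2]) (by simp; omega)
        simp [solutionLoop, h10, hp, this]
        have h1 : 10 - ans.length = (10 - (ans.length + 1)) + 1 := by omega
        rw [h1, List.take_succ_cons]
        simp
      · have := ih ans h
        simp [solutionLoop, h10, hp, this]

-- A's two-key comparison is the strict lexicographic order of the (-score, id) key
lemma sorted2_eq_sorted (xs : List (Int × String)) :
    PySem.List.sorted2 xs (fun p => -p.1) (fun p => p.2)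
      = PySem.List.sorted xs (fun p => (toLex (-p.1, p.2) : Lex (Int × String))) := by
  have h : (fun (a b : Int × String) => decide (-a.1 < -b.1) || (!decide (-b.1 < -a.1) && decide (a.2 < b.2)))
      = (fun (a b : Int × String) => decide ((toLex (-a.1, a.2) : Lex (Int × String)) < toLex (-b.1, b.2))) := by
    funext a b
    rw [Bool.eq_iff_iff]
    simp only [Bool.or_eq_true, Bool.and_eq_true, Bool.not_eq_true', decide_eq_true_eq,
      decide_eq_false_iff_not, Prod.Lex.toLex_lt_toLex]
    constructor
    · rintro (h1 | ⟨h1, h2⟩)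
      · exact Or.inl h1
      · rcases lt_or_eq_of_le (not_lt.mp h1) with h3 | h3
        · exact Or.inl h3
        · exact Or.inr ⟨h3, h2⟩
    · rintro (h1 | ⟨h1, h2⟩)
      · exact Or.inl h1
      · exact Or.inr ⟨by omega, h2⟩
  simp only [PySem.List.sorted2, PySem.List.sorted, if_neg (by decide : ¬ (false = true))]
  rw [h]

-- Python's `top[j] <= key` is the lexicographic ≤ of the key pairs
lemma pyKeyLe_eq (p q : Int × String) :
    pyKeyLe p q = decide ((toLex p : Lex (Int × String)) ≤ toLex q) := by
  rw [Bool.eq_iff_iff]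
  simp [pyKeyLe, Prod.Lex.toLex_le_toLex]

-- B's scan-and-insert is insertion before the first strictly greater element
lemma insertKey_eq (x : Int × String) (s : List (Int × String)) :
    insertKey x s
      = PySem.List.insertBy (fun a b => decide ((toLex a : Lex (Int × String)) < toLex b)) x s := by
  induction s with
  | nil => simp [insertKey, PySem.List.insertBy]
  | cons y ys ih =>
    simp only [insertKey, PySem.List.insertBy, pyKeyLe_eq, ih]
    by_cases h : (toLex x : Lex (Int × String)) < toLex y
    · simp [h, not_le.mpr h]
    · simp [h, not_lt.mp h]

-- inserting into the kept prefix and re-truncating is truncating the full insertion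
lemma take_insertKey (x : Int × String) : ∀ (n : Nat) (s : List (Int × String)),
    (insertKey x (s.take n)).take n = (insertKey x s).take n := by
  intro n s
  induction s generalizing n with
  | nil => simp
  | cons y ys ih =>
    cases n with
    | zero => simp
    | succ m =>
      simp only [List.take_succ_cons, insertKey]
      by_cases h : pyKeyLe y x
      · simp [h, ih]
      · simp only [h]
        cases m <;> simp [List.take_take]

-- B's interleaved `del top[10:]` commutes with the whole fold
lemma foldl_take_insertKey (cond : List String → Prop) [DecidablePred cond]
    (key : List String → Int × String) (l : List (List String)) : ∀ S : List (Int × String),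
    l.foldl (fun top s => if cond s then (insertKey (key s) top).take 10 else top) (S.take 10)
      = (l.foldl (fun S s => if cond s then insertKey (key s) S else S) S).take 10 := by
  induction l with
  | nil => intro S; simp
  | cons s rest ih =>
    intro S
    by_cases h : cond s
    · simp only [List.foldl_cons, if_pos h, take_insertKey]
      exact ih (insertKey (key s) S)
    · simp only [List.foldl_cons, if_neg h]
      exact ih S

-- ===== VERDICT (by name: the statement is the Claim_ definition above) =====
theorem solution_spec : Claim_equal_solution := by
  intro ds tags _ _
  show solution ds tags = solution_alt ds tags
  set keyOf : List String → Int × String :=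
    fun s => (-(rowScore tags s), (PySem.List.pyGet? s 0).getD "") with hkeyOf
  -- ===== A side: full sort, then filter the positives and take 10 =====
  unfold solution
  rw [PySem.List.foldl_append_singleton_eq_map, List.nil_append]
  dsimp only []
  rw [List.map_map, sorted2_eq_sorted, solutionLoop_eq _ [] (by simp)]
  simp only [List.nil_append, List.length_nil, Nat.sub_zero]
  -- ===== B side: the bounded fold is take 10 of the insertion sort of the positive keys =====
  unfold solution_alt
  rw [show ([] : List (Int × String)) = ([] : List (Int × String)).take 10 from rfl,
      foldl_take_insertKey (fun s => rowScore tags s > 0) keyOf ds []]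
  rw [PySem.List.foldl_ite_eq_foldl_filter]
  rw [← List.foldl_map (f := keyOf) (g := fun S k => insertKey k S)]
  simp only [insertKey_eq]
  rw [← PySem.List.sorted_eq_foldl_insertBy, List.map_take]
  -- both sides sort the same positive keys: stable sorted lists under an injective key agree
  have hXY : (List.filter (fun p => decide (p.1 > 0))
        (PySem.List.sorted
          (List.map ((fun d => (List.foldl (fun acc t => if PySem.Set.contains d.2 t then acc + 1 else acc) (0:Int) tags, d.1)) ∘
            fun s => ((PySem.List.pyGet? s 0).getD "", PySem.Set.ofList (PySem.List.slice s (some 1)))) ds)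
          (fun p => (toLex (-p.1, p.2) : Lex (Int × String))))).map (fun p => (-p.1, p.2))
      = PySem.List.sorted (List.map keyOf (List.filter (fun x => decide (rowScore tags x > 0)) ds))
          (fun p => (toLex p : Lex (Int × String))) := by
    apply PySem.List.eq_of_perm_of_pairwise_le_of_injective (key := fun p : Int × String => (toLex p : Lex (Int × String)))
    · exact fun a b h => toLex.injective h
    · have h4 : (List.filter (fun p => decide (p.1 > 0))
          (List.map ((fun d => (List.foldl (fun acc t => if PySem.Set.contains d.2 t then acc + 1 else acc) (0:Int) tags, d.1)) ∘
            fun s => ((PySem.List.pyGet? s 0).getD "", PySem.Set.ofList (PySem.List.slice s (some 1)))) ds)).map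
            (fun p => ((-p.1, p.2) : Int × String))
          = List.map keyOf (List.filter (fun x => decide (rowScore tags x > 0)) ds) := by
        rw [List.filter_map, List.map_map]
        rfl
      exact ((((PySem.List.sorted_perm _ _ _).filter _).map _)).trans
        (h4 ▸ (PySem.List.sorted_perm _ _ _).symm)
    · exact List.pairwise_map.mpr ((PySem.List.sorted_pairwise _ _).filter _)
    · exact PySem.List.sorted_pairwise _ _
  rw [← hXY, List.map_map]
  rfl
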